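-- pv_equiv track=rewrite | github.com/iman-11/iman-TP | 12.py | cle
-- ===== SOURCE A (Python) =====
-- def cle(list,dict):
--     l=[]
--     l.extend(dict.values())
--     new_list=[]
--     for i in list:
--         for j in l:
--             if i==j:
--                 new_list.append(i)
--     return new_list
-- ===== SOURCE B (Python) =====
-- def cle(list, dict):
--     vals = sorted(dict.values())
--     n = len(vals)
--
--     def left(x):
--         lo, hi = 0, n
--         while lo < hi:
--             mid = (lo + hi) // 2
--             if vals[mid] < x:
--                 lo = mid + 1
--             else:
--                 hi = mid
--         return lo
--
--     def right(x):
--         lo, hi = 0, n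
--         while lo < hi:
--             mid = (lo + hi) // 2
--             if x < vals[mid]:
--                 hi = mid
--             else:
--                 lo = mid + 1
--         return lo
--
--     out = []
--     for x in list:
--         out += [x] * (right(x) - left(x))
--     return out
-- ===== Notes on version B (the rewrite author's own statement) =====
-- stated objective: faster
-- what changed: B sorts the dict's values once and, for each list element, finds its multiplicity by two hand-written binary searches (bisect_left/bisect_right) on the sorted array, emitting that many copies, instead of A's inner linear scan over all values per list element.
import Mathlib
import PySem

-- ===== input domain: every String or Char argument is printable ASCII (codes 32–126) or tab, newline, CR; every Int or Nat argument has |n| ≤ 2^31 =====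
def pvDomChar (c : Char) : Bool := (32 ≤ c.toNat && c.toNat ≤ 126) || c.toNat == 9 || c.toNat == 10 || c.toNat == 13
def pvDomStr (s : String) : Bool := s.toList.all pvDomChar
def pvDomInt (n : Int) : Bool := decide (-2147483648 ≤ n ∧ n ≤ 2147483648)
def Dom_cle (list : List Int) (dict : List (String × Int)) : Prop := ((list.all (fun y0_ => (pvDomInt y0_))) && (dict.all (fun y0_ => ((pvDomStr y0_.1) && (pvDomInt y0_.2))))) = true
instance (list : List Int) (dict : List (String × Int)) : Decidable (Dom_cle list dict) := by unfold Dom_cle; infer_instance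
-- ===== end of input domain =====

-- ===== PORT A =====
-- l = list of dict.values(); nested loops append i whenever i == j
def cle (list : List Int) (dict : List (String × Int)) : List Int :=
  let l : List Int := dict.map Prod.snd
  list.foldl (fun acc i => l.foldl (fun acc2 j => if i == j then acc2 ++ [i] else acc2) acc) []

-- ===== PORT B =====
-- B: sort the values once, then per list element two binary searches give the multiplicity.
-- Source B's hand-written `left`/`right` while-loops are verbatim bisect_left/bisect_right,
-- ported as the prelude's exact primitives PySem.List.bisectLeft / bisectRight.
def cle_alt (list : List Int) (dict : List (String × Int)) : List Int :=
  let vals : List Int := PySem.List.sorted (dict.map Prod.snd) (fun v => v) false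
  list.foldl (fun acc x =>
    acc ++ List.replicate (PySem.List.bisectRight vals x - PySem.List.bisectLeft vals x) x) []

-- ===== PRECONDITION & SPEC =====
def Spec_cle (list : List Int) (dict : List (String × Int)) (out : List Int) : Prop := out = cle_alt list dict
instance (list : List Int) (dict : List (String × Int)) (out : List Int) : Decidable (Spec_cle list dict out) := by unfold Spec_cle; infer_instance

-- ===== CLAIM =====
def Claim_equal_cle : Prop := ∀ (list : List Int) (dict : List (String × Int)), Dom_cle list dict → Spec_cle list dict (cle list dict)

-- ===== LEMMAS AND PROOFS =====

-- inner loop of A appends i once per matching value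
lemma cle_inner (i : Int) (l : List Int) (acc : List Int) :
    l.foldl (fun acc2 j => if i == j then acc2 ++ [i] else acc2) acc
      = acc ++ List.replicate (l.count i) i := by
  induction l generalizing acc with
  | nil => simp
  | cons j t ih =>
    simp only [List.foldl_cons, ih]
    by_cases h : i = j
    · subst h
      simp only [beq_self_eq_true, if_true, List.count_cons_self]
      simp [List.replicate_succ]
    · have hji : (j == i) = false := by simpa [BEq.comm] using h
      simp [h, List.count_cons, hji]

-- a list whose first L index-positions satisfy p and the rest refute it has countP p = L
lemma countP_eq_of_cut (l : List Int) (p : Int → Bool) (L : Nat) (hL : L ≤ l.length)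
    (h1 : ∀ j (hj : j < l.length), j < L → p l[j])
    (h2 : ∀ j (hj : j < l.length), L ≤ j → ¬ p l[j]) : l.countP p = L := by
  induction l generalizing L with
  | nil => simp [(Nat.le_zero.mp hL)]
  | cons a t ih =>
    cases L with
    | zero =>
      have : ∀ x ∈ a :: t, ¬ p x := by
        intro x hx
        obtain ⟨j, hj, rfl⟩ := List.getElem_of_mem hx
        exact h2 j hj (Nat.zero_le j)
      simp [List.countP_eq_zero.mpr this]
    | succ L' =>
      have hpa : p a := h1 0 (by simp) (Nat.succ_pos _)
      have ht : t.countP p = L' := by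
        refine ih L' (by simpa using hL) ?_ ?_
        · intro j hj hjL
          have := h1 (j+1) (by simpa using Nat.succ_lt_succ hj) (Nat.succ_lt_succ hjL)
          simpa using this
        · intro j hj hjL
          have := h2 (j+1) (by simpa using Nat.succ_lt_succ hj) (Nat.succ_le_succ hjL)
          simpa using this
      simp [hpa, ht]

-- countP (≤ x) splits into countP (< x) plus the exact count of x
lemma countP_le_split (l : List Int) (x : Int) :
    l.countP (fun v => decide (v ≤ x)) = l.countP (fun v => decide (v < x)) + l.count x := by
  induction l with
  | nil => simp
  | cons a t ih =>
    by_cases h : a = x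
    · subst h
      simp [ih]
      omega
    · rcases lt_or_ge a x with hlt | hge
      · simp [ih, hlt, le_of_lt hlt, h]; omega
      · have h1 : ¬ a ≤ x := fun hle => h (le_antisymm hle hge)
        have h2 : ¬ a < x := fun hlt => h1 (le_of_lt hlt)
        simp [ih, h1, h2, h]

-- on a sorted list, bisectRight - bisectLeft is the multiplicity of x
lemma bisect_sub_eq_count (vals : List Int) (x : Int)
    (hs : vals.Pairwise (fun a b => a ≤ b)) :
    PySem.List.bisectRight vals x - PySem.List.bisectLeft vals x = vals.count x := by
  obtain ⟨hLle, hL1, hL2⟩ := PySem.List.bisectLeft_spec vals x hs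
  obtain ⟨hRle, hR1, hR2⟩ := PySem.List.bisectRight_spec vals x hs
  have hL : vals.countP (fun v => decide (v < x)) = PySem.List.bisectLeft vals x := by
    refine countP_eq_of_cut vals _ _ hLle ?_ ?_
    · intro j hj hjL; simpa using hL1 j hj hjL
    · intro j hj hjL; simpa using not_lt.mpr (hL2 j hj hjL)
  have hR : vals.countP (fun v => decide (v ≤ x)) = PySem.List.bisectRight vals x := by
    refine countP_eq_of_cut vals _ _ hRle ?_ ?_
    · intro j hj hjL; simpa using hR1 j hj hjL
    · intro j hj hjL; simpa using not_le.mpr (hR2 j hj hjL)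
  have := countP_le_split vals x
  omega

-- ===== VERDICT =====
theorem cle_spec : Claim_equal_cle := by
  intro list dict _
  unfold Spec_cle cle cle_alt
  have hperm : (PySem.List.sorted (dict.map Prod.snd) (fun v => v) false).Perm (dict.map Prod.snd) :=
    PySem.List.sorted_perm _ _ _
  have hsorted : (PySem.List.sorted (dict.map Prod.snd) (fun v => v) false).Pairwise (fun a b => a ≤ b) := by
    simpa using PySem.List.sorted_pairwise (dict.map Prod.snd) (fun v => v)
  simp only [cle_inner, bisect_sub_eq_count _ _ hsorted, hperm.count_eq]
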